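-- pv_equiv track=rewrite | github.com/JuliaSzymanska/Global-Coding-Challange-2020 | Question_3/Python/Question3.py | find_min_days
-- ===== SOURCE A (Python) =====
-- def find_min_days(prices, profit):
--     string = []
--     for k in profit:
--         buyDate = -1
--         sellDate = -1
--         for i in enumerate(prices):
--             if sellDate <= i[0] + 1 and sellDate != -1:
--                 break
--             if (k + i[1]) in prices[(i[0] + 1):]:
--                 index = prices[(i[0] + 1):].index(k + i[1]) + i[0] + 1
--                 if buyDate != -1 and sellDate != -1:
--                     if index + 1 < sellDate or (index + 1 == sellDate and i[0] + 1 > buyDate):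
--                         buyDate = i[0] + 1
--                         sellDate = index + 1
--                 else:
--                     buyDate = i[0] + 1
--                     sellDate = index + 1
--         if buyDate == -1 and sellDate == -1:
--             string.append("-1")
--         else:
--             string.append(str(buyDate) + " " + str(sellDate))
--         string.append(",")
--     return "".join(string[:-1])
-- ===== SOURCE B (Python) =====
-- def find_min_days(prices, profit):
--     # Sell-major single pass per profit: walk the prices once, remembering the most
--     # recent day each price was seen; the first day whose price minus the profit was
--     # already seen gives the earliest sell day, and the remembered day the latest buy.
--     parts = []
--     for k in profit:
--         last_seen = {}
--         entry = "-1"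
--         for s, p in enumerate(prices):
--             b = last_seen.get(p - k)
--             if b is not None:
--                 entry = str(b + 1) + " " + str(s + 1)
--                 break
--             last_seen[p] = s
--         parts.append(entry)
--     return ",".join(parts)
-- ===== Notes on version B (the rewrite author's own statement) =====
-- stated objective: faster
-- what changed: A scans buy days and for each rescans the whole suffix (membership + .index on a fresh slice) keeping the best pair; B makes one sell-major pass per profit with a dict mapping each price to its most recent day, so the first sell day hit gives the answer directly and all inner scans disappear.
import Mathlib
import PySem

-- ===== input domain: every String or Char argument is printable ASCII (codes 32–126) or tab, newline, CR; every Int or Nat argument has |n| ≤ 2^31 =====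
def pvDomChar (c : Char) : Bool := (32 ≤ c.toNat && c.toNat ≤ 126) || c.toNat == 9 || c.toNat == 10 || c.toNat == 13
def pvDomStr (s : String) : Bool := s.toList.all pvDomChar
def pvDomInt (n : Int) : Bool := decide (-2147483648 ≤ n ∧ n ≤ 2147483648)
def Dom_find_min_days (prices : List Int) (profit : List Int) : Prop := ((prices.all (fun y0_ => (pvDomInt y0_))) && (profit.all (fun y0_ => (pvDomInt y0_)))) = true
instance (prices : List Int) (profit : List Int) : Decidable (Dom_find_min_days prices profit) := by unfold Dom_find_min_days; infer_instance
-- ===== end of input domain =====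

-- B replaces A's buy-major scan with repeated suffix searches by one sell-major pass per
-- profit over a last-seen-day dict (objective: faster; equivalence of the RETURN value).

-- ===== PORT A =====
-- A's inner `for i in enumerate(prices)` loop, recursing over the remaining prices with
-- the running index `idx`; the recursion remainder `rest` IS `prices[(idx+1):]`, so the
-- `in`-test plus `.index` on that slice is one `index?` on `rest` (some = member + index).
def findAloop (k : Int) : List Int → Int → Int × Int → Int × Int
  | [], _, st => st
  | p :: rest, idx, st =>
    if st.2 ≤ idx + 1 ∧ st.2 ≠ -1 then st
    else
      match PySem.List.index? rest (k + p) with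
      | some j =>
        let index : Int := (j : Int) + idx + 1
        if st.1 ≠ -1 ∧ st.2 ≠ -1 then
          if index + 1 < st.2 ∨ (index + 1 = st.2 ∧ idx + 1 > st.1) then
            findAloop k rest (idx + 1) (idx + 1, index + 1)
          else findAloop k rest (idx + 1) st
        else findAloop k rest (idx + 1) (idx + 1, index + 1)
      | none => findAloop k rest (idx + 1) st

def find_min_days (prices : List Int) (profit : List Int) : String :=
  let strs : List String := profit.foldl (fun acc k =>
    let st := findAloop k prices 0 (-1, -1)
    acc ++ [(if st.1 = -1 ∧ st.2 = -1 then "-1"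
             else PySem.Int.toStr st.1 ++ " " ++ PySem.Int.toStr st.2), ","]) []
  PySem.Str.join "" (PySem.List.slice strs none (some (-1)))

-- ===== PORT B =====
-- B's inner loop: one pass over the prices, `lastSeen` maps a price to the most recent
-- (Int) day it occurred before the current day `s`; the first hit of `p - k` answers.
def findBloop (k : Int) : List Int → Int → PySem.Dict Int Int → Option (Int × Int)
  | [], _, _ => none
  | p :: rest, s, lastSeen =>
    match lastSeen.get? (p - k) with
    | some b => some (b + 1, s + 1)
    | none => findBloop k rest (s + 1) (lastSeen.insert p s)

def find_min_days_alt (prices : List Int) (profit : List Int) : String :=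
  PySem.Str.join "," (profit.map (fun k =>
    match findBloop k prices 0 PySem.Dict.empty with
    | some (b, s) => PySem.Int.toStr b ++ " " ++ PySem.Int.toStr s
    | none => "-1"))

-- ===== PRECONDITION & SPEC =====
def Spec_find_min_days (prices : List Int) (profit : List Int) (out : String) : Prop := out = find_min_days_alt prices profit
instance (prices : List Int) (profit : List Int) (out : String) : Decidable (Spec_find_min_days prices profit out) := by unfold Spec_find_min_days; infer_instance

-- ===== CLAIM (what is proved, stated in full; the proofs are below) =====
def Claim_equal_find_min_days : Prop := ∀ (prices : List Int) (profit : List Int), Dom_find_min_days prices profit → Spec_find_min_days prices profit (find_min_days prices profit)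

-- ===== LEMMAS AND PROOFS =====

-- last index of v in l (0-based), proof-side reference for B's dict
def lastIdxOf : List Int → Int → Option Nat
  | [], _ => none
  | x :: xs, v =>
    match lastIdxOf xs v with
    | some j => some (j + 1)
    | none => if x = v then some 0 else none

-- sell-major reference: scan rest, pref = prices already passed; 0-based (buy, sell)
def refGo (k : Int) : List Int → List Int → Option (Nat × Nat)
  | _, [] => none
  | pref, p :: rest =>
    match lastIdxOf pref (p - k) with
    | some b => some (b, pref.length)
    | none => refGo k (pref ++ [p]) rest

-- encode an optional 0-based pair as A's (buyDate, sellDate) state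
def encSt : Option (Nat × Nat) → Int × Int
  | none => (-1, -1)
  | some (b, s) => ((b : Int) + 1, (s : Int) + 1)

-- first sell day for buy day b (0-based), as A's inner search computes it
def sbA (k : Int) (P : List Int) (b : Nat) : Option Nat :=
  (PySem.List.index? (P.drop (b + 1)) (k + P.getD b 0)).map (fun j => b + 1 + j)

-- A's best-pair update rule on 0-based pairs
def updO (cur : Option (Nat × Nat)) (b : Nat) (c : Option Nat) : Option (Nat × Nat) :=
  match c with
  | none => cur
  | some s =>
    match cur with
    | none => some (b, s)
    | some (b0, s0) => if s < s0 ∨ (s = s0 ∧ b0 < b) then some (b, s) else some (b0, s0)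

-- A's loop without the break, in 0-based form (only the length of the first list matters)
def bestFrom (k : Int) (P : List Int) : List Int → Nat → Option (Nat × Nat) → Option (Nat × Nat)
  | [], _, cur => cur
  | _ :: rest, i, cur => bestFrom k P rest (i + 1) (updO cur i (sbA k P i))

def IsBest (k : Int) (P : List Int) (i : Nat) (cur : Option (Nat × Nat)) : Prop :=
  match cur with
  | none => ∀ b, b < i → sbA k P b = none
  | some (b, s) => b < i ∧ sbA k P b = some s ∧
      ∀ b' s', b' < i → sbA k P b' = some s' → s < s' ∨ (s = s' ∧ b' ≤ b)

-- the per-profit entry strings of the two ports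
def entryA (prices : List Int) (k : Int) : String :=
  let st := findAloop k prices 0 (-1, -1)
  if st.1 = -1 ∧ st.2 = -1 then "-1"
  else PySem.Int.toStr st.1 ++ " " ++ PySem.Int.toStr st.2

def entryB (prices : List Int) (k : Int) : String :=
  match findBloop k prices 0 PySem.Dict.empty with
  | some (b, s) => PySem.Int.toStr b ++ " " ++ PySem.Int.toStr s
  | none => "-1"

theorem lastIdxOf_eq_none_iff (l : List Int) (v : Int) : lastIdxOf l v = none ↔ v ∉ l := by
  induction l with
  | nil => simp [lastIdxOf]
  | cons x xs ih =>
    cases h : lastIdxOf xs v with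
    | some j =>
      have hv : v ∈ xs := by
        by_contra hc
        rw [← ih] at hc
        simp [hc] at h
      simp [lastIdxOf, h, hv]
    | none =>
      have hv : v ∉ xs := ih.mp h
      by_cases hx : x = v
      · subst hx
        simp [lastIdxOf, h]
      · simp [lastIdxOf, h, hx, hv]
        exact fun hh => hx hh.symm

theorem lastIdxOf_append_singleton (l : List Int) (v p : Int) :
    lastIdxOf (l ++ [p]) v = if v = p then some l.length else lastIdxOf l v := by
  induction l with
  | nil =>
    by_cases h : v = p
    · subst h; simp [lastIdxOf]
    · simp only [List.nil_append, lastIdxOf, if_neg h]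
      rw [if_neg (fun hh => h hh.symm)]
  | cons x xs ih =>
    show (match lastIdxOf (xs ++ [p]) v with
          | some j => some (j + 1)
          | none => if x = v then some 0 else none) = _
    rw [ih]
    by_cases h : v = p
    · simp [h]
    · simp only [if_neg h]
      show _ = (match lastIdxOf xs v with
          | some j => some (j + 1)
          | none => if x = v then some 0 else none)
      cases lastIdxOf xs v <;> simp

theorem lastIdxOf_spec {l : List Int} {v : Int} {b : Nat} (h : lastIdxOf l v = some b) :
    b < l.length ∧ l.getD b 0 = v ∧ ∀ b', b < b' → b' < l.length → l.getD b' 0 ≠ v := by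
  induction l generalizing b with
  | nil => simp [lastIdxOf] at h
  | cons x xs ih =>
    cases h' : lastIdxOf xs v with
    | some j =>
      simp only [lastIdxOf, h'] at h
      obtain rfl : j + 1 = b := by simpa using h
      obtain ⟨h1, h2, h3⟩ := ih h'
      refine ⟨by simpa using h1, by simpa using h2, ?_⟩
      intro b' hb1 hb2
      obtain ⟨b'', rfl⟩ : ∃ b'', b' = b'' + 1 := ⟨b' - 1, by omega⟩
      simpa using h3 b'' (by omega) (by simpa using hb2)
    | none =>
      simp only [lastIdxOf, h'] at h
      have hv : v ∉ xs := (lastIdxOf_eq_none_iff xs v).mp h'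
      by_cases hx : x = v
      · rw [if_pos hx] at h
        obtain rfl : 0 = b := by simpa using h
        refine ⟨by simp, by simpa using hx, ?_⟩
        intro b' hb1 hb2
        obtain ⟨b'', rfl⟩ : ∃ b'', b' = b'' + 1 := ⟨b' - 1, by omega⟩
        have hlt : b'' < xs.length := by simpa using hb2
        have hg : xs.getD b'' 0 = xs[b''] := List.getD_eq_getElem xs 0 hlt
        simp only [List.getD_cons_succ, hg]
        exact fun hc => hv (hc ▸ List.getElem_mem hlt)
      · rw [if_neg hx] at h; simp at h

theorem findBloop_eq_refGo (k : Int) (l : List Int) : ∀ (pref : List Int) (d : PySem.Dict Int Int),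
    (∀ v, d.get? v = (lastIdxOf pref v).map (fun j => (j : Int))) →
    findBloop k l (pref.length : Int) d
      = (refGo k pref l).map (fun pr => ((pr.1 : Int) + 1, (pr.2 : Int) + 1)) := by
  induction l with
  | nil => intro pref d _; simp [findBloop, refGo]
  | cons p rest ih =>
    intro pref d hinv
    have hd := hinv (p - k)
    show (match d.get? (p - k) with
          | some b => some (b + 1, (pref.length : Int) + 1)
          | none => findBloop k rest ((pref.length : Int) + 1) (d.insert p (pref.length : Int))) = _
    show _ = (match lastIdxOf pref (p - k) with
              | some b => some (b, pref.length)
              | none => refGo k (pref ++ [p]) rest).map _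
    cases hli : lastIdxOf pref (p - k) with
    | some j =>
      rw [hli] at hd
      rw [hd]
      simp
    | none =>
      rw [hli] at hd
      simp only [hd]
      have hcast : ((pref.length : Int) + 1) = (((pref ++ [p]).length : Nat) : Int) := by
        simp
      rw [hcast]
      apply ih
      intro v
      rw [PySem.Dict.get?_insert, lastIdxOf_append_singleton]
      by_cases hv : v = p
      · simp [hv]
      · simp [hv, hinv v]

theorem sbA_some {k : Int} {P : List Int} {b s : Nat} (h : sbA k P b = some s) :
    b < s ∧ s < P.length ∧ P.getD s 0 = P.getD b 0 + k ∧
      ∀ t, b < t → t < s → P.getD t 0 ≠ P.getD b 0 + k := by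
  unfold sbA at h
  obtain ⟨j, hj, rfl⟩ : ∃ j, PySem.List.index? (P.drop (b + 1)) (k + P.getD b 0) = some j ∧ b + 1 + j = s := by
    cases hidx : PySem.List.index? (P.drop (b + 1)) (k + P.getD b 0) with
    | none => rw [hidx] at h; simp at h
    | some j => rw [hidx] at h; exact ⟨j, rfl, by simpa using h⟩
  obtain ⟨hk, hget, hmin⟩ := PySem.List.getElem_of_index?_eq_some hj
  have hlen : (P.drop (b + 1)).length = P.length - (b + 1) := by simp
  have hs : b + 1 + j < P.length := by omega
  have hgd : (P.drop (b + 1))[j]'hk = P[b + 1 + j]'hs := by rw [List.getElem_drop]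
  refine ⟨by omega, hs, ?_, ?_⟩
  · rw [List.getD_eq_getElem P 0 hs, ← hgd, hget]; ring
  · intro t ht1 ht2
    have htP : t < P.length := by omega
    have hmin' := hmin (t - (b + 1)) (by omega)
    rw [List.getElem_drop] at hmin'
    rw [List.getD_eq_getElem P 0 htP]
    intro hc
    apply hmin'
    have he : b + 1 + (t - (b + 1)) = t := by omega
    simp_rw [he]
    rw [hc]; ring

theorem sbA_none {k : Int} {P : List Int} {b : Nat} (h : sbA k P b = none) :
    ∀ s, b < s → s < P.length → P.getD s 0 ≠ P.getD b 0 + k := by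
  unfold sbA at h
  have hidx : PySem.List.index? (P.drop (b + 1)) (k + P.getD b 0) = none := by
    cases hi : PySem.List.index? (P.drop (b + 1)) (k + P.getD b 0) with
    | none => rfl
    | some j => rw [hi] at h; simp at h
  have hnm := (PySem.List.index?_eq_none_iff _ _).mp hidx
  intro s hs1 hs2 hc
  apply hnm
  have hjs : s - (b + 1) < (P.drop (b + 1)).length := by simp; omega
  have hge : (P.drop (b + 1))[s - (b + 1)]'hjs = P[s]'hs2 := by
    rw [List.getElem_drop]; congr 1; omega
  have hmem : P[s]'hs2 ∈ P.drop (b + 1) := hge ▸ List.getElem_mem hjs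
  rw [List.getD_eq_getElem P 0 hs2] at hc
  have hv : k + P.getD b 0 = P[s]'hs2 := by rw [hc]; ring
  rw [hv]; exact hmem

theorem sbA_exists {k : Int} {P : List Int} {b s : Nat}
    (hbs : b < s) (hsn : s < P.length) (hv : P.getD s 0 = P.getD b 0 + k) :
    ∃ s', sbA k P b = some s' ∧ s' ≤ s := by
  cases hA : sbA k P b with
  | none => exact absurd hv (sbA_none hA s hbs hsn)
  | some s' =>
    refine ⟨s', rfl, ?_⟩
    obtain ⟨h1, h2, h3, h4⟩ := sbA_some hA
    by_contra hgt
    exact h4 s hbs (by omega) hv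

theorem isBest_step {k : Int} {P : List Int} {i : Nat} {cur : Option (Nat × Nat)}
    (h : IsBest k P i cur) : IsBest k P (i + 1) (updO cur i (sbA k P i)) := by
  cases cur with
  | none =>
    simp only [IsBest] at h
    cases hc : sbA k P i with
    | none =>
      simp only [updO, IsBest]
      intro b hb
      rcases Nat.lt_succ_iff_lt_or_eq.mp hb with hb' | rfl
      · exact h b hb'
      · exact hc
    | some s' =>
      simp only [updO, IsBest]
      refine ⟨Nat.lt_succ_self i, hc, ?_⟩
      intro b' s'' hb' hsb
      rcases Nat.lt_succ_iff_lt_or_eq.mp hb' with hb'' | rfl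
      · exact absurd hsb (by rw [h b' hb'']; simp)
      · rw [hc] at hsb
        right
        exact ⟨by simpa using hsb, le_refl _⟩
  | some pair =>
    obtain ⟨b0, s0⟩ := pair
    simp only [IsBest] at h
    obtain ⟨hb0, hsb0, hmax⟩ := h
    cases hc : sbA k P i with
    | none =>
      simp only [updO, IsBest]
      refine ⟨Nat.lt_succ_of_lt hb0, hsb0, ?_⟩
      intro b' s' hb' hs
      rcases Nat.lt_succ_iff_lt_or_eq.mp hb' with hb'' | rfl
      · exact hmax b' s' hb'' hs
      · exact absurd hs (by rw [hc]; simp)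
    | some s' =>
      simp only [updO]
      split_ifs with hcond
      · simp only [IsBest]
        refine ⟨Nat.lt_succ_self i, hc, ?_⟩
        intro b' s'' hb' hs
        rcases Nat.lt_succ_iff_lt_or_eq.mp hb' with hb'' | rfl
        · have := hmax b' s'' hb'' hs
          omega
        · rw [hc] at hs
          have : s' = s'' := by simpa using hs
          omega
      · simp only [IsBest]
        refine ⟨Nat.lt_succ_of_lt hb0, hsb0, ?_⟩
        intro b' s'' hb' hs
        rcases Nat.lt_succ_iff_lt_or_eq.mp hb' with hb'' | rfl
        · exact hmax b' s'' hb'' hs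
        · rw [hc] at hs
          have : s' = s'' := by simpa using hs
          omega

theorem bestFrom_isBest (k : Int) (P : List Int) (l : List Int) :
    ∀ (i : Nat) (cur : Option (Nat × Nat)), IsBest k P i cur →
      IsBest k P (i + l.length) (bestFrom k P l i cur) := by
  induction l with
  | nil => intro i cur h; simpa [bestFrom] using h
  | cons x rest ih =>
    intro i cur h
    have hr := ih (i + 1) _ (isBest_step h)
    have heq : i + 1 + rest.length = i + (x :: rest).length := by simp; omega
    rw [heq] at hr
    simpa [bestFrom] using hr

theorem bestFrom_frozen (k : Int) (P : List Int) (l : List Int) :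
    ∀ (i : Nat) (b0 s0 : Nat), s0 ≤ i →
      bestFrom k P l i (some (b0, s0)) = some (b0, s0) := by
  induction l with
  | nil => intro i b0 s0 _; rfl
  | cons x rest ih =>
    intro i b0 s0 hs
    show bestFrom k P rest (i + 1) (updO (some (b0, s0)) i (sbA k P i)) = _
    cases hc : sbA k P i with
    | none =>
      simp only [updO]
      exact ih (i + 1) b0 s0 (by omega)
    | some s' =>
      have hi : i < s' := (sbA_some hc).1
      simp only [updO]
      rw [if_neg (by omega)]
      exact ih (i + 1) b0 s0 (by omega)

theorem findAloop_eq_bestFrom (k : Int) (l : List Int) :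
    ∀ (pref : List Int) (cur : Option (Nat × Nat)),
      findAloop k l (pref.length : Int) (encSt cur)
        = encSt (bestFrom k (pref ++ l) l pref.length cur) := by
  induction l with
  | nil => intro pref cur; simp [findAloop, bestFrom]
  | cons p rest ih =>
    intro pref cur
    have hP : pref ++ p :: rest = (pref ++ [p]) ++ rest := by simp
    have hget : (pref ++ p :: rest).getD pref.length 0 = p := by
      rw [List.getD_eq_getElem (pref ++ p :: rest) 0 (by simp)]
      rw [List.getElem_append_right (le_refl _)]
      simp
    have hdrop : (pref ++ p :: rest).drop (pref.length + 1) = rest := by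
      rw [hP, show pref.length + 1 = (pref ++ [p]).length by simp, List.drop_left]
    have hsbA : sbA k (pref ++ p :: rest) pref.length
        = (PySem.List.index? rest (k + p)).map (fun j => pref.length + 1 + j) := by
      unfold sbA; rw [hdrop, hget]
    have hlen1 : ((pref ++ [p]).length : Int) = (pref.length : Int) + 1 := by simp
    have hlen2 : (pref ++ [p]).length = pref.length + 1 := by simp
    cases cur with
    | none =>
      simp only [findAloop, encSt, bestFrom]
      rw [if_neg (fun h => h.2 rfl)]
      rw [hsbA]
      cases hidx : PySem.List.index? rest (k + p) with
      | none =>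
        simp only [updO, Option.map_none]
        have h2 := ih (pref ++ [p]) none
        rw [hlen1, ← hP, hlen2] at h2
        simpa [encSt] using h2
      | some j =>
        simp only [updO, Option.map_some]
        rw [if_neg (fun h => h.1 rfl)]
        have h2 := ih (pref ++ [p]) (some (pref.length, pref.length + 1 + j))
        rw [hlen1, ← hP, hlen2] at h2
        have hst : (((pref.length : Int)) + 1, ((j : Int) + (pref.length : Int) + 1) + 1)
            = encSt (some (pref.length, pref.length + 1 + j)) := by
          simp only [encSt, Prod.mk.injEq]; refine ⟨trivial, by push_cast; ring⟩
        rw [hst]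
        exact h2
    | some pair =>
      obtain ⟨b0, s0⟩ := pair
      simp only [findAloop, encSt]
      by_cases hbr : s0 ≤ pref.length
      · have hcnd : (s0 : Int) + 1 ≤ (pref.length : Int) + 1 ∧ (s0 : Int) + 1 ≠ -1 :=
          ⟨by omega, by omega⟩
        rw [if_pos hcnd]
        rw [bestFrom_frozen k (pref ++ p :: rest) (p :: rest) pref.length b0 s0 hbr]
      · have hcnd : ¬((s0 : Int) + 1 ≤ (pref.length : Int) + 1 ∧ (s0 : Int) + 1 ≠ -1) := by
          omega
        rw [if_neg hcnd]
        show _ = encSt (bestFrom k (pref ++ p :: rest) rest (pref.length + 1)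
          (updO (some (b0, s0)) pref.length (sbA k (pref ++ p :: rest) pref.length)))
        rw [hsbA]
        cases hidx : PySem.List.index? rest (k + p) with
        | none =>
          simp only [Option.map_none, updO]
          have h2 := ih (pref ++ [p]) (some (b0, s0))
          rw [hlen1, ← hP, hlen2] at h2
          simpa [encSt] using h2
        | some j =>
          simp only [Option.map_some, updO]
          have hne : (b0 : Int) + 1 ≠ -1 ∧ (s0 : Int) + 1 ≠ -1 := ⟨by omega, by omega⟩
          rw [if_pos hne]
          by_cases hupd : pref.length + 1 + j < s0 ∨ (pref.length + 1 + j = s0 ∧ b0 < pref.length)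
          · have hci : (j : Int) + ↑pref.length + 1 + 1 < (s0 : Int) + 1 ∨
                (j : Int) + ↑pref.length + 1 + 1 = (s0 : Int) + 1 ∧ (pref.length : Int) + 1 > (b0 : Int) + 1 := by
              omega
            rw [if_pos hci]
            rw [if_pos hupd]
            have h2 := ih (pref ++ [p]) (some (pref.length, pref.length + 1 + j))
            rw [hlen1, ← hP, hlen2] at h2
            have hst : (((pref.length : Int)) + 1, ((j : Int) + (pref.length : Int) + 1) + 1)
                = encSt (some (pref.length, pref.length + 1 + j)) := by
              simp only [encSt, Prod.mk.injEq]; refine ⟨trivial, by push_cast; ring⟩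
            rw [hst]
            exact h2
          · have hci : ¬((j : Int) + ↑pref.length + 1 + 1 < (s0 : Int) + 1 ∨
                (j : Int) + ↑pref.length + 1 + 1 = (s0 : Int) + 1 ∧ (pref.length : Int) + 1 > (b0 : Int) + 1) := by
              omega
            rw [if_neg hci]
            rw [if_neg hupd]
            have h2 := ih (pref ++ [p]) (some (b0, s0))
            rw [hlen1, ← hP, hlen2] at h2
            simpa [encSt] using h2

theorem refGo_none {k : Int} {P : List Int} (l : List Int) : ∀ (pref : List Int), pref ++ l = P →
    refGo k pref l = none →
    ∀ s, pref.length ≤ s → s < P.length → ∀ b, b < s → P.getD s 0 ≠ P.getD b 0 + k := by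
  induction l with
  | nil =>
    intro pref hP _ s hs1 hs2 b _
    exfalso
    rw [← hP] at hs2
    simp at hs2
    omega
  | cons p rest ih =>
    intro pref hP h s hs1 hs2 b hb
    subst hP
    have hli : lastIdxOf pref (p - k) = none := by
      cases hli' : lastIdxOf pref (p - k) with
      | none => rfl
      | some j =>
        simp only [refGo, hli'] at h
        cases h
    have hrec : refGo k (pref ++ [p]) rest = none := by
      simp only [refGo, hli] at h; exact h
    by_cases hse : s = pref.length
    · have hbl : b < pref.length := by omega
      have hgs : (pref ++ p :: rest).getD pref.length 0 = p := by
        rw [List.getD_eq_getElem (pref ++ p :: rest) 0 (by simp)]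
        rw [List.getElem_append_right (le_refl _)]
        simp
      have hgb : (pref ++ p :: rest).getD b 0 = pref[b]'hbl := by
        rw [List.getD_eq_getElem (pref ++ p :: rest) 0 (by simp; omega)]
        rw [List.getElem_append_left hbl]
      have hnm : p - k ∉ pref := (lastIdxOf_eq_none_iff pref (p - k)).mp hli
      rw [hse, hgs, hgb]
      intro hc
      exact hnm (by rw [show p - k = pref[b]'hbl by omega]; exact List.getElem_mem hbl)
    · exact ih (pref ++ [p]) (by simp) hrec s (by simp; omega) hs2 b hb

theorem refGo_some {k : Int} {P : List Int} (l : List Int) : ∀ (pref : List Int) (b s : Nat), pref ++ l = P →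
    refGo k pref l = some (b, s) →
    pref.length ≤ s ∧ s < P.length ∧ b < s ∧ P.getD s 0 = P.getD b 0 + k ∧
      (∀ t, pref.length ≤ t → t < s → ∀ b', b' < t → P.getD t 0 ≠ P.getD b' 0 + k) ∧
      (∀ b', b < b' → b' < s → P.getD b' 0 ≠ P.getD s 0 - k) := by
  induction l with
  | nil => intro pref b s _ h; simp [refGo] at h
  | cons p rest ih =>
    intro pref b s hP h
    subst hP
    have hgs : (pref ++ p :: rest).getD pref.length 0 = p := by
      rw [List.getD_eq_getElem (pref ++ p :: rest) 0 (by simp)]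
      rw [List.getElem_append_right (le_refl _)]
      simp
    have hgb : ∀ (b' : Nat) (hb' : b' < pref.length), (pref ++ p :: rest).getD b' 0 = pref[b']'hb' := by
      intro b' hb'
      rw [List.getD_eq_getElem (pref ++ p :: rest) 0 (by simp; omega)]
      rw [List.getElem_append_left hb']
    cases hli : lastIdxOf pref (p - k) with
    | some b1 =>
      simp only [refGo, hli, Option.some.injEq, Prod.mk.injEq] at h
      obtain ⟨hb1b, hps⟩ := h
      rw [hb1b] at hli
      obtain ⟨hL1, hL2, hL3⟩ := lastIdxOf_spec hli
      refine ⟨by omega, by rw [List.length_append, List.length_cons]; omega, by omega, ?_, ?_, ?_⟩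
      · rw [← hps, hgs, hgb b hL1]
        rw [List.getD_eq_getElem pref 0 hL1] at hL2
        omega
      · intro t ht1 ht2
        exfalso
        omega
      · intro b' hbb hbs
        have hbl : b' < pref.length := by omega
        rw [← hps, hgs, hgb b' hbl]
        have hne := hL3 b' hbb hbl
        rw [List.getD_eq_getElem pref 0 hbl] at hne
        omega
    | none =>
      simp only [refGo, hli] at h
      obtain ⟨ih1, ih2, ih3, ih4, ih5, ih6⟩ := ih (pref ++ [p]) b s (by simp) h
      refine ⟨by simp at ih1; omega, ih2, ih3, ih4, ?_, ih6⟩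
      intro t ht1 ht2 b' hb'
      by_cases hte : t = pref.length
      · have hbl : b' < pref.length := by omega
        have hnm : p - k ∉ pref := (lastIdxOf_eq_none_iff pref (p - k)).mp hli
        rw [hte, hgs, hgb b' hbl]
        intro hc
        exact hnm (by rw [show p - k = pref[b']'hbl by omega]; exact List.getElem_mem hbl)
      · exact ih5 t (by simp; omega) ht2 b' hb'

theorem best_eq_ref {k : Int} {P : List Int} {cur : Option (Nat × Nat)}
    (h : IsBest k P P.length cur) : refGo k [] P = cur := by
  cases cur with
  | none =>
    simp only [IsBest] at h
    cases hr : refGo k [] P with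
    | none => rfl
    | some pr =>
      exfalso
      obtain ⟨b, s⟩ := pr
      obtain ⟨_, hs2, hs3, hs4, _, _⟩ := refGo_some (P := P) P [] b s (by simp) hr
      obtain ⟨s', hs', _⟩ := sbA_exists hs3 hs2 hs4
      exact absurd hs' (by rw [h b (by omega)]; simp)
  | some pair =>
    obtain ⟨b, s⟩ := pair
    simp only [IsBest] at h
    obtain ⟨hbn, hsb, hmax⟩ := h
    obtain ⟨hA1, hA2, hA3, _⟩ := sbA_some hsb
    cases hr : refGo k [] P with
    | none =>
      exfalso
      exact refGo_none (P := P) P [] (by simp) hr s (by simp) hA2 b hA1 hA3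
    | some pr =>
      obtain ⟨b1, s1⟩ := pr
      obtain ⟨_, hr2, hr3, hr4, hr5, hr6⟩ := refGo_some (P := P) P [] b1 s1 (by simp) hr
      -- s1 ≤ s : the reference sell day is minimal
      have hs1le : s1 ≤ s := by
        by_contra hgt
        exact hr5 s (by simp) (by omega) b hA1 hA3
      -- s ≤ s1 : b1's first sell day s2 ≤ s1, and the loop's pair is at least as good
      obtain ⟨s2, hs2, hs2le⟩ := sbA_exists hr3 hr2 hr4
      have hb1n : b1 < P.length := by omega
      have hcmp := hmax b1 s2 hb1n hs2
      have hse : s1 = s := by omega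
      subst hse
      -- b ≤ b1 : b1 is the last matching buy below s1
      have hble : b ≤ b1 := by
        by_contra hgt
        exact hr6 b (by omega) hA1 (by omega)
      have hb1b : b1 = b := by omega
      rw [hb1b]

theorem state_eq (k : Int) (P : List Int) :
    findAloop k P 0 (-1, -1) = encSt (refGo k [] P) := by
  have h0 := findAloop_eq_bestFrom k P [] none
  simp only [List.length_nil, Nat.cast_zero, List.nil_append, encSt] at h0
  have hIB : IsBest k P 0 none := by
    simp only [IsBest]
    intro b hb
    omega
  have hb := bestFrom_isBest k P P 0 none hIB
  rw [Nat.zero_add] at hb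
  rw [best_eq_ref hb]
  exact h0

theorem entry_eq (P : List Int) (k : Int) : entryA P k = entryB P k := by
  unfold entryA entryB
  rw [state_eq]
  have hB := findBloop_eq_refGo k P [] PySem.Dict.empty
      (fun v => by simp [lastIdxOf, PySem.Dict.get?_empty])
  simp only [List.length_nil, Nat.cast_zero] at hB
  rw [hB]
  cases refGo k [] P with
  | none => simp [encSt]
  | some pr =>
    obtain ⟨b, s⟩ := pr
    simp only [encSt, Option.map_some]
    rw [if_neg (by omega)]

theorem charsJoin_nil_flatten (l : List (List Char)) : PySem.Chars.join [] l = l.flatten := by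
  induction l with
  | nil => simp [PySem.Chars.join_nil]
  | cons c rest ih =>
    cases rest with
    | nil => simp [PySem.Chars.join_singleton]
    | cons d ds =>
      rw [PySem.Chars.join_cons_cons]
      simp [ih]

theorem flatten_drop_comma (cs : List (List Char)) :
    (cs.flatMap (fun c => [c, [',']])).dropLast.flatten = PySem.Chars.join [','] cs := by
  induction cs with
  | nil => simp [PySem.Chars.join_nil]
  | cons c cs' ih =>
    cases cs' with
    | nil => simp [PySem.Chars.join_singleton]
    | cons c2 cs'' =>
      have hfm : ((c :: c2 :: cs'').flatMap (fun c => [c, [',']]))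
          = c :: [','] :: ((c2 :: cs'').flatMap (fun c => [c, [',']])) := by simp
      rw [hfm]
      have hne : ((c2 :: cs'').flatMap (fun c => [c, [',']])) ≠ [] := by simp
      rw [List.dropLast_cons₂, List.dropLast_cons_of_ne_nil hne]
      rw [PySem.Chars.join_cons_cons]
      simp only [List.flatten_cons]
      rw [ih, List.append_assoc]

theorem join_drop_comma (es : List String) :
    PySem.Str.join "" (es.flatMap (fun e => [e, ","])).dropLast = PySem.Str.join "," es := by
  apply String.toList_injective
  rw [PySem.Str.toList_join, PySem.Str.toList_join]
  have h1 : ("" : String).toList = [] := rfl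
  have h2 : ("," : String).toList = [','] := rfl
  rw [h1, h2]
  rw [List.map_dropLast]
  have hmap : (es.flatMap (fun e => [e, ","])).map String.toList
      = (es.map String.toList).flatMap (fun c => [c, [',']]) := by
    induction es with
    | nil => simp
    | cons e es' ih => simp [ih]
  rw [hmap, charsJoin_nil_flatten, flatten_drop_comma]

theorem flatMap_entry (f : Int → String) (l : List Int) :
    l.flatMap (fun k => [f k, ","]) = (l.map f).flatMap (fun e => [e, ","]) := by
  induction l with
  | nil => simp
  | cons x xs ih => simp [ih]

-- ===== VERDICT (by name: the statement is the Claim_ definition above) =====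
theorem find_min_days_spec : Claim_equal_find_min_days := by
  intro prices profit _
  show find_min_days prices profit = find_min_days_alt prices profit
  unfold find_min_days find_min_days_alt
  have hfold : profit.foldl (fun acc k =>
      let st := findAloop k prices 0 (-1, -1)
      acc ++ [(if st.1 = -1 ∧ st.2 = -1 then "-1"
               else PySem.Int.toStr st.1 ++ " " ++ PySem.Int.toStr st.2), ","]) []
      = profit.foldl (fun acc k => acc ++ [entryA prices k, ","]) [] := rfl
  have hmap := flatMap_entry (entryA prices) profit
  have hent : profit.map (entryA prices) = profit.map (fun k =>
      match findBloop k prices 0 PySem.Dict.empty with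
      | some (b, s) => PySem.Int.toStr b ++ " " ++ PySem.Int.toStr s
      | none => "-1") := by
    apply List.map_congr_left
    intro k _
    exact entry_eq prices k
  rw [hfold, PySem.List.foldl_append_eq_flatMap, List.nil_append]
  show PySem.Str.join "" (PySem.List.slice (profit.flatMap (fun k => [entryA prices k, ","])) none (some (-1))) = _
  rw [PySem.List.slice_to_neg_one, hmap, join_drop_comma, hent]
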